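-- pv_equiv track=rewrite | github.com/utsho34/python-DSA | Hackerrank/maximum cost of laptop.py | maxCost
-- ===== SOURCE A (Python) =====
-- def maxCost(cost, labels, dailyCount):
--     # Write your code here
--     sol = 0
--     s_count = 0
--     s_cost = 0
--     for i, j in zip(cost, labels):
--         s_cost += i
--         if j == "illegal":
--             continue
--         s_count += 1
--         if s_count == dailyCount:
--             sol = max(sol, s_cost)
--             s_cost = 0
--             s_count = 0
--     return sol
-- ===== SOURCE B (Python) =====
-- def maxCost(cost, labels, dailyCount):
--     if dailyCount <= 0:
--         return 0
--     # running prefix sums of cost, recorded at each legal position (zip-truncated)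
--     sums = []
--     acc = 0
--     for c, l in zip(cost, labels):
--         acc += c
--         if l != "illegal":
--             sums.append(acc)
--     # group boundaries are every dailyCount-th legal position; each window cost
--     # is the difference of the recorded prefix sums at consecutive boundaries
--     best = 0
--     prev = 0
--     i = dailyCount - 1
--     while i < len(sums):
--         b = sums[i]
--         best = max(best, b - prev)
--         prev = b
--         i += dailyCount
--     return best
-- ===== Notes on version B (the rewrite author's own statement) =====
-- stated objective: alternative
-- what changed: Replaces A's single running loop with reset-on-boundary counters by two phases: first record the running prefix sum at every legal position, then stride through those recorded sums at every dailyCount-th position and take differences of consecutive boundary sums.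
import Mathlib
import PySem

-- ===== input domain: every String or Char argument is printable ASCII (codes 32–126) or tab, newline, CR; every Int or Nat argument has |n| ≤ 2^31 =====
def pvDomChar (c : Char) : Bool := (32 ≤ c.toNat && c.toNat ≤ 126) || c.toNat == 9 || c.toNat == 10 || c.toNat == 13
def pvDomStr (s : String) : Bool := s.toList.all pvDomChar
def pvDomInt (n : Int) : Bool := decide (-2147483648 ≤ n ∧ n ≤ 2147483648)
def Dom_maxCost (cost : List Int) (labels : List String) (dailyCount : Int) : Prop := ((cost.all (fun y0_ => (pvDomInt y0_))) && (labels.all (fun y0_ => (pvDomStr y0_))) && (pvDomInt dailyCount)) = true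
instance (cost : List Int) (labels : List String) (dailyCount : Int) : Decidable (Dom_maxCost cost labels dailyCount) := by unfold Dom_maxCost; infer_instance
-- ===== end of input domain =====

-- B replaces A's one running loop (reset counters at each boundary) by a two-phase
-- decomposition: record prefix sums at legal positions, then stride over boundaries.

-- ===== PORT A =====
-- loop over zip(cost, labels) with state (sol, s_count, s_cost)
def maxCostLoop (d : Int) : List (Int × String) → Int → Int → Int → Int
  | [], sol, _, _ => sol
  | (i, j) :: t, sol, sCount, sCost =>
    let sCost' := sCost + i
    if j == "illegal" then maxCostLoop d t sol sCount sCost'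
    else
      let sCount' := sCount + 1
      if sCount' == d then maxCostLoop d t (max sol sCost') 0 0
      else maxCostLoop d t sol sCount' sCost'

def maxCost (cost : List Int) (labels : List String) (dailyCount : Int) : Int :=
  maxCostLoop dailyCount (cost.zip labels) 0 0 0

-- ===== PORT B =====
-- phase 1: running prefix sums of cost, recorded at each legal position
def legalSums : List (Int × String) → Int → List Int
  | [], _ => []
  | (c, l) :: t, acc =>
    let acc' := acc + c
    if l != "illegal" then acc' :: legalSums t acc' else legalSums t acc'

-- phase 2: Source B's while loop over indices i = d-1, 2d-1, … into sums
-- (the `1 ≤ d ∧ 0 ≤ i` part of the guard only makes the same computation total;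
--  Source B reaches this loop only with dailyCount ≥ 1 and i ≥ dailyCount-1 ≥ 0)
def strideScan (d : Int) (sums : List Int) (i prev best : Int) : Int :=
  if _h : 1 ≤ d ∧ 0 ≤ i ∧ i.toNat < sums.length then
    let b := (PySem.List.pyGet? sums i).getD 0
    strideScan d sums (i + d) b (max best (b - prev))
  else best
termination_by sums.length - i.toNat
decreasing_by
  omega

def maxCost_alt (cost : List Int) (labels : List String) (dailyCount : Int) : Int :=
  if dailyCount ≤ 0 then 0
  else strideScan dailyCount (legalSums (cost.zip labels) 0) (dailyCount - 1) 0 0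

-- ===== PRECONDITION & SPEC =====
def Spec_maxCost (cost : List Int) (labels : List String) (dailyCount : Int) (out : Int) : Prop := out = maxCost_alt cost labels dailyCount
instance (cost : List Int) (labels : List String) (dailyCount : Int) (out : Int) : Decidable (Spec_maxCost cost labels dailyCount out) := by unfold Spec_maxCost; infer_instance

-- ===== CLAIM (what is proved, stated in full; the proofs are below) =====
def Claim_equal_maxCost : Prop := ∀ (cost : List Int) (labels : List String) (dailyCount : Int), Dom_maxCost cost labels dailyCount → Spec_maxCost cost labels dailyCount (maxCost cost labels dailyCount)

-- ===== LEMMAS AND PROOFS =====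

-- intermediate bridge: structural chunking of the legal-sum list
-- (m = elements remaining until the next boundary; resets to d afterwards)
def gchunk (d m : Int) (sums : List Int) (prev best : Int) : Int :=
  if _h : 1 ≤ m ∧ m.toNat ≤ sums.length then
    let b := (PySem.List.pyGet? sums (m - 1)).getD 0
    gchunk d d (sums.drop m.toNat) b (max best (b - prev))
  else best
termination_by sums.length
decreasing_by
  simp only [List.length_drop]
  omega

theorem gchunk_nil (d m prev best : Int) : gchunk d m [] prev best = best := by
  rw [gchunk.eq_def]
  simp only [List.length_nil, Nat.le_zero]
  rw [dif_neg]
  omega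

theorem gchunk_one (d : Int) (x : Int) (rest : List Int) (prev best : Int) :
    gchunk d 1 (x :: rest) prev best = gchunk d d rest x (max best (x - prev)) := by
  conv_lhs => rw [gchunk.eq_def]
  simp [PySem.List.pyGet?, PySem.List.pyIdx?]

theorem gchunk_step (d m : Int) (hm : 2 ≤ m) (x : Int) (rest : List Int) (prev best : Int) :
    gchunk d m (x :: rest) prev best = gchunk d (m - 1) rest prev best := by
  conv_lhs => rw [gchunk.eq_def]
  conv_rhs => rw [gchunk.eq_def]
  have h1 : (1 ≤ m ∧ m.toNat ≤ (x :: rest).length) ↔ (1 ≤ m - 1 ∧ (m - 1).toNat ≤ rest.length) := by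
    simp only [List.length_cons]; omega
  by_cases hc : 1 ≤ m - 1 ∧ (m - 1).toNat ≤ rest.length
  · rw [dif_pos (h1.mpr hc), dif_pos hc]
    have hget : (PySem.List.pyGet? (x :: rest) (m - 1)).getD 0
        = (PySem.List.pyGet? rest (m - 1 - 1)).getD 0 := by
      have h2 : m - 1 = (((m - 1).toNat : ℕ) : Int) := by omega
      rw [h2, PySem.List.pyGet?_natCast]
      have h3 : ((((m - 1).toNat : ℕ) : Int) - 1) = (((m - 1).toNat - 1 : ℕ) : Int) := by omega
      rw [h3, PySem.List.pyGet?_natCast]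
      have h4 : (m - 1).toNat = ((m - 1).toNat - 1) + 1 := by omega
      conv_lhs => rw [h4]
      rw [List.getElem?_cons_succ]
    have hdrop : (x :: rest).drop m.toNat = rest.drop (m - 1).toNat := by
      have h4 : m.toNat = (m - 1).toNat + 1 := by omega
      rw [h4]; simp
    rw [hget, hdrop]
  · rw [dif_neg (fun hh => hc (h1.mp hh)), dif_neg hc]

-- the stride scan of Source B agrees with gchunk on the suffix it still has to visit
theorem strideScan_eq_gchunk (d : Int) (hd : 1 ≤ d) :
    ∀ (n : ℕ) (sums : List Int) (k : ℕ) (m prev best : Int),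
      sums.length - k ≤ n → 1 ≤ m →
      gchunk d m (sums.drop k) prev best = strideScan d sums ((k : Int) + (m - 1)) prev best := by
  intro n
  induction n with
  | zero =>
    intro sums k m prev best hn hm
    have hk : sums.length ≤ k := by omega
    rw [List.drop_eq_nil_of_le hk, gchunk_nil, strideScan.eq_def]
    rw [dif_neg]
    intro hcon
    obtain ⟨-, h2, h3⟩ := hcon
    omega
  | succ n ih =>
    intro sums k m prev best hn hm
    conv_lhs => rw [gchunk.eq_def]
    conv_rhs => rw [strideScan.eq_def]
    have hlen : (sums.drop k).length = sums.length - k := by simp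
    have hguard : (1 ≤ m ∧ m.toNat ≤ (sums.drop k).length)
        ↔ (1 ≤ d ∧ 0 ≤ (k : Int) + (m - 1) ∧ ((k : Int) + (m - 1)).toNat < sums.length) := by
      constructor
      · intro ⟨h1, h2⟩; refine ⟨hd, by omega, by omega⟩
      · intro ⟨_, h2, h3⟩; refine ⟨hm, by omega⟩
    by_cases hc : 1 ≤ m ∧ m.toNat ≤ (sums.drop k).length
    · rw [dif_pos hc, dif_pos (hguard.mp hc)]
      have hget : (PySem.List.pyGet? (sums.drop k) (m - 1)).getD 0
          = (PySem.List.pyGet? sums ((k : Int) + (m - 1))).getD 0 := by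
        have h2 : m - 1 = (((m - 1).toNat : ℕ) : Int) := by omega
        rw [h2, PySem.List.pyGet?_natCast]
        have h3 : ((k : Int) + (((m - 1).toNat : ℕ) : Int)) = (((k + (m - 1).toNat : ℕ)) : Int) := by push_cast; ring
        rw [h3, PySem.List.pyGet?_natCast, List.getElem?_drop]
      rw [hget]
      have hdd : (sums.drop k).drop m.toNat = sums.drop (k + m.toNat) := by
        rw [List.drop_drop]
      rw [hdd]
      have harg : ((k + m.toNat : ℕ) : Int) + (d - 1) = (k : Int) + (m - 1) + d := by
        push_cast; omega
      rw [← harg]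
      apply ih
      · have := hc.2; omega
      · omega
    · rw [dif_neg hc, dif_neg (fun hh => hc (hguard.mpr hh))]

-- A's loop, from any mid-window state, equals gchunk over the legal prefix sums
theorem loop_eq_gchunk (d : Int) (hd : 1 ≤ d) :
    ∀ (zs : List (Int × String)) (cnt cs sol a : Int),
      0 ≤ cnt → cnt < d →
      maxCostLoop d zs sol cnt cs = gchunk d (d - cnt) (legalSums zs a) (a - cs) sol := by
  intro zs
  induction zs with
  | nil =>
    intro cnt cs sol a h0 h1
    simp only [legalSums]
    rw [gchunk_nil]
    rfl
  | cons p t ih =>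
    intro cnt cs sol a h0 h1
    obtain ⟨c, l⟩ := p
    show maxCostLoop d ((c, l) :: t) sol cnt cs = _
    simp only [maxCostLoop, legalSums]
    by_cases hill : l = "illegal"
    · simp only [hill]
      simp only [beq_self_eq_true, if_true, bne_self_eq_false, Bool.false_eq_true, if_false]
      rw [ih cnt (cs + c) sol (a + c) h0 h1]
      congr 1
      omega
    · have hb : (l == "illegal") = false := by simp [hill]
      have hb' : (l != "illegal") = true := by simp [hill]
      simp only [hb, Bool.false_eq_true, if_false, hb', if_true]
      by_cases hcnt : cnt + 1 = d
      · have hbeq : (cnt + 1 == d) = true := by simp [hcnt]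
        simp only [hbeq, if_true]
        have hm1 : d - cnt = 1 := by omega
        rw [hm1, gchunk_one]
        have hmax : a + c - (a - cs) = cs + c := by ring
        rw [hmax]
        have := ih 0 0 (max sol (cs + c)) (a + c) le_rfl (by omega)
        simpa using this
      · have hbeq : (cnt + 1 == d) = false := by simp [hcnt]
        simp only [hbeq, Bool.false_eq_true, if_false]
        rw [gchunk_step d (d - cnt) (by omega)]
        rw [ih (cnt + 1) (cs + c) sol (a + c) (by omega) (by omega)]
        congr 1
        · omega
        · omega

-- dailyCount ≤ 0: A's counter (always ≥ 0) never hits dailyCount, so sol stays put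
theorem loop_nonpos (d : Int) (hd : d ≤ 0) :
    ∀ (zs : List (Int × String)) (cnt cs sol : Int), 0 ≤ cnt →
      maxCostLoop d zs sol cnt cs = sol := by
  intro zs
  induction zs with
  | nil => intro cnt cs sol h0; rfl
  | cons p t ih =>
    intro cnt cs sol h0
    obtain ⟨c, l⟩ := p
    simp only [maxCostLoop]
    by_cases hill : (l == "illegal") = true
    · simp only [hill, if_true]
      exact ih cnt (cs + c) sol h0
    · simp only [hill, Bool.false_eq_true, if_false]
      have hbeq : (cnt + 1 == d) = false := by
        simp only [beq_eq_false_iff_ne, ne_eq]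
        omega
      simp only [hbeq, Bool.false_eq_true, if_false]
      exact ih (cnt + 1) (cs + c) sol (by omega)

-- ===== VERDICT (by name: the statement is the Claim_ definition above) =====
theorem maxCost_spec : Claim_equal_maxCost := by
  intro cost labels d _
  unfold Spec_maxCost maxCost maxCost_alt
  by_cases hd : d ≤ 0
  · rw [if_pos hd]
    exact loop_nonpos d hd (cost.zip labels) 0 0 0 le_rfl
  · rw [if_neg hd]
    have hd1 : 1 ≤ d := by omega
    rw [loop_eq_gchunk d hd1 (cost.zip labels) 0 0 0 0 le_rfl (by omega)]
    have := strideScan_eq_gchunk d hd1 (legalSums (cost.zip labels) 0).length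
      (legalSums (cost.zip labels) 0) 0 d 0 0 (by omega) hd1
    simpa using this
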